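-- pv_equiv track=rewrite | github.com/Sebastian906/Proyecto-ADA25B | tests/test_algorithms/diagnostic_validation.py | are_equivalent
-- ===== SOURCE A (Python) =====
-- def are_equivalent(complexity1: str, complexity2: str) -> bool:
--     """Verifica si dos complejidades son matemáticamente equivalentes."""
--     if not complexity1 or not complexity2:
--         return False
--
--     # Comparación directa
--     if complexity1 == complexity2:
--         return True
--
--     # Equivalencias conocidas
--     equivalences = {
--         'n2': ['nn', 'nsquared', 'n^2'],
--         'n3': ['nnn', 'ncubed', 'n^3'],
--         'logn': ['log(n)', 'lgn'],
--         'nlogn': ['nlog(n)', 'n*logn'],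
--         '1': ['constant', 'k'],
--     }
--
--     for standard, variants in equivalences.items():
--         if complexity1 in [standard] + variants and complexity2 in [standard] + variants:
--             return True
--
--     return False
-- ===== SOURCE B (Python) =====
-- # Idiomatic re-implementation: one flat canonical-form table, built once;
-- # equivalence = equal canonical forms (identity default covers unknown strings).
-- _CANON = {
--     'n2': 'n2', 'nn': 'n2', 'nsquared': 'n2', 'n^2': 'n2',
--     'n3': 'n3', 'nnn': 'n3', 'ncubed': 'n3', 'n^3': 'n3',
--     'logn': 'logn', 'log(n)': 'logn', 'lgn': 'logn',
--     'nlogn': 'nlogn', 'nlog(n)': 'nlogn', 'n*logn': 'nlogn',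
--     '1': '1', 'constant': '1', 'k': '1',
-- }
--
-- def are_equivalent(complexity1: str, complexity2: str) -> bool:
--     """Verifica si dos complejidades son matemáticamente equivalentes."""
--     if not complexity1 or not complexity2:
--         return False
--     return _CANON.get(complexity1, complexity1) == _CANON.get(complexity2, complexity2)
-- ===== Notes on version B (the rewrite author's own statement) =====
-- stated objective: idiomatic
-- what changed: Replaced the explicit-equality shortcut plus the loop over equivalence groups (with per-group list membership tests) by a single flat canonical-form table looked up once per argument with an identity default, comparing canonical forms.
import Mathlib
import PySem

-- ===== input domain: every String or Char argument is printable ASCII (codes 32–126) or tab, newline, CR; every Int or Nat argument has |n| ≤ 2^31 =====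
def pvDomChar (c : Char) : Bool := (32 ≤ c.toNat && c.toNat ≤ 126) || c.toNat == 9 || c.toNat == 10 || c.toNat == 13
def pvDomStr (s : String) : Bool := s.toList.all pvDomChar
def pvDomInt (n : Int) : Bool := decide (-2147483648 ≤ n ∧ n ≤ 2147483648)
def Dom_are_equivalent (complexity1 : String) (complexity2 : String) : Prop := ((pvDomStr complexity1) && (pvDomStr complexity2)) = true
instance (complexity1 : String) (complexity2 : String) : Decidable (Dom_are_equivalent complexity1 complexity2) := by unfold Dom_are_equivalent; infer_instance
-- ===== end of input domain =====

-- B replaces A's group loop by one flat canonical-form table with identity-default lookup (idiomatic).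


-- ===== PORT A =====
-- the dict literal 'equivalences' (items in insertion order)
def pvEquivalences : List (String × List String) :=
  [("n2", ["nn", "nsquared", "n^2"]),
   ("n3", ["nnn", "ncubed", "n^3"]),
   ("logn", ["log(n)", "lgn"]),
   ("nlogn", ["nlog(n)", "n*logn"]),
   ("1", ["constant", "k"])]

-- the 'for standard, variants in equivalences.items()' loop with early return
def pvLoopA (c1 c2 : String) : List (String × List String) → Bool
  | [] => false
  | (standard, variants) :: rest =>
      if (standard :: variants).contains c1 && (standard :: variants).contains c2 then true
      else pvLoopA c1 c2 rest

def are_equivalent (complexity1 : String) (complexity2 : String) : Bool :=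
  if complexity1 == "" || complexity2 == "" then false
  else if complexity1 == complexity2 then true
  else pvLoopA complexity1 complexity2 pvEquivalences

-- ===== PORT B =====
-- the flat dict _CANON
def pvCanonTable : PySem.Dict String String :=
  PySem.Dict.ofList
    [("n2", "n2"), ("nn", "n2"), ("nsquared", "n2"), ("n^2", "n2"),
     ("n3", "n3"), ("nnn", "n3"), ("ncubed", "n3"), ("n^3", "n3"),
     ("logn", "logn"), ("log(n)", "logn"), ("lgn", "logn"),
     ("nlogn", "nlogn"), ("nlog(n)", "nlogn"), ("n*logn", "nlogn"),
     ("1", "1"), ("constant", "1"), ("k", "1")]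

def are_equivalent_alt (complexity1 : String) (complexity2 : String) : Bool :=
  if complexity1 == "" || complexity2 == "" then false
  else pvCanonTable.getD complexity1 complexity1 == pvCanonTable.getD complexity2 complexity2

-- ===== PRECONDITION & SPEC =====
def Spec_are_equivalent (complexity1 : String) (complexity2 : String) (out : Bool) : Prop := out = are_equivalent_alt complexity1 complexity2
instance (complexity1 : String) (complexity2 : String) (out : Bool) : Decidable (Spec_are_equivalent complexity1 complexity2 out) := by unfold Spec_are_equivalent; infer_instance

-- ===== CLAIM (what is proved, stated in full; the proofs are below) =====
def Claim_equal_are_equivalent : Prop := ∀ (complexity1 : String) (complexity2 : String), Dom_are_equivalent complexity1 complexity2 → Spec_are_equivalent complexity1 complexity2 (are_equivalent complexity1 complexity2)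

-- ===== LEMMAS AND PROOFS =====
-- the 20 strings known to either program (keys of pvCanonTable = members of pvEquivalences' groups)
def pvAllNames : List String :=
  ["n2", "nn", "nsquared", "n^2", "n3", "nnn", "ncubed", "n^3",
   "logn", "log(n)", "lgn", "nlogn", "nlog(n)", "n*logn", "1", "constant", "k"]

theorem pvCanon_unknown (s : String) (h : s ∉ pvAllNames) :
    pvCanonTable.getD s s = s := by
  simp [pvAllNames, not_or, eq_comm (a := s)] at h
  have e : pvCanonTable = PySem.Dict.mk
    [("n2", "n2"), ("nn", "n2"), ("nsquared", "n2"), ("n^2", "n2"),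
     ("n3", "n3"), ("nnn", "n3"), ("ncubed", "n3"), ("n^3", "n3"),
     ("logn", "logn"), ("log(n)", "logn"), ("lgn", "logn"),
     ("nlogn", "nlogn"), ("nlog(n)", "nlogn"), ("n*logn", "nlogn"),
     ("1", "1"), ("constant", "1"), ("k", "1")] := by decide
  rw [e]
  simp only [PySem.Dict.getD, PySem.Dict.get?_mk_cons, beq_iff_eq]
  simp [PySem.Dict.get?, h]

theorem pvLoopA_unknown_left (c1 c2 : String) (h : c1 ∉ pvAllNames) :
    pvLoopA c1 c2 pvEquivalences = false := by
  simp [pvAllNames, not_or] at h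
  simp [pvEquivalences, pvLoopA, h]

theorem pvLoopA_unknown_right (c1 c2 : String) (h : c2 ∉ pvAllNames) :
    pvLoopA c1 c2 pvEquivalences = false := by
  simp [pvAllNames, not_or] at h
  simp [pvEquivalences, pvLoopA, h]

theorem pvCanon_known_mem (s : String) (h : s ∈ pvAllNames) :
    pvCanonTable.getD s s ∈ pvAllNames := by
  fin_cases h <;> decide

theorem pv_key (c1 c2 : String) : are_equivalent c1 c2 = are_equivalent_alt c1 c2 := by
  by_cases h1 : c1 = ""
  · simp [are_equivalent, are_equivalent_alt, h1]
  by_cases h2 : c2 = ""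
  · simp [are_equivalent, are_equivalent_alt, h2]
  by_cases hc : c1 = c2
  · simp [are_equivalent, are_equivalent_alt, h2, hc]
  simp only [are_equivalent, are_equivalent_alt, beq_iff_eq, hc, if_false]
  by_cases k1 : c1 ∈ pvAllNames
  · by_cases k2 : c2 ∈ pvAllNames
    · fin_cases k1 <;> fin_cases k2 <;> decide
    · rw [pvLoopA_unknown_right _ _ k2, pvCanon_unknown c2 k2]
      have m := pvCanon_known_mem c1 k1
      have hne : pvCanonTable.getD c1 c1 ≠ c2 := fun e => k2 (e ▸ m)
      simp [hne]
  · rw [pvLoopA_unknown_left _ _ k1, pvCanon_unknown c1 k1]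
    by_cases k2 : c2 ∈ pvAllNames
    · have m := pvCanon_known_mem c2 k2
      have hne : c1 ≠ pvCanonTable.getD c2 c2 := fun e => k1 (e ▸ m)
      simp [hne]
    · rw [pvCanon_unknown c2 k2]; simp [hc]

-- ===== VERDICT (by name: the statement is the Claim_ definition above) =====
theorem are_equivalent_spec : Claim_equal_are_equivalent := by
  intro c1 c2 _
  exact pv_key c1 c2
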